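-- pv_equiv track=rewrite | github.com/kakaomame8/othello2025 | __int__.py | myai
-- ===== SOURCE A (Python) =====
-- def myai(board, color):
--     size = len(board)
--     opponent = 3 - color
--     corners = [(0, 0), (0, size-1), (size-1, 0), (size-1, size-1)]
--     adjacent_to_corners = set()
--
--     for cr, cc in corners:
--         for dr in [-1, 0, 1]:
--             for dc in [-1, 0, 1]:
--                 nr, nc = cr + dr, cc + dc
--                 if 0 <= nr < size and 0 <= nc < size and (nr, nc) not in corners:
--                     adjacent_to_corners.add((nr, nc))
--
--     def count_flips(row, col, color):
--         if board[row][col] != 0: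
--             return 0
--
--         flips = 0
--         directions = [(-1,-1), (-1,0), (-1,1), (0,-1), (0,1), (1,-1), (1,0), (1,1)]
--
--         for dr, dc in directions:
--             temp_flips = 0
--             r, c = row + dr, col + dc
--
--             while 0 <= r < size and 0 <= c < size and board[r][c] == opponent:
--                 temp_flips += 1
--                 r += dr
--                 c += dc
--
--             if 0 <= r < size and 0 <= c < size and board[r][c] == color and temp_flips > 0:
--                 flips += temp_flips
--
--         return flips
--
--     valid_moves = []
--     for r in range(size):
--         for c in range(size):
--             if board[r][c] == 0:
--                 flips = count_flips(r, c, color)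
--                 if flips > 0:
--                     valid_moves.append((c, r, flips))
--
--     if not valid_moves:
--         return None
--
--     corner_moves = [m for m in valid_moves if (m[1], m[0]) in corners]
--     if corner_moves:
--         return (corner_moves[0][0], corner_moves[0][1])
--
--     non_adjacent_moves = [m for m in valid_moves if (m[1], m[0]) not in adjacent_to_corners]
--     non_adjacent_moves.sort(key=lambda x: x[2], reverse=True)
--
--     if non_adjacent_moves:
--         return (non_adjacent_moves[0][0], non_adjacent_moves[0][1])
--
--     valid_moves.sort(key=lambda x: x[2], reverse=True)
--     return (valid_moves[0][0], valid_moves[0][1])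
-- ===== SOURCE B (Python) =====
-- def myai(board, color):
--     size = len(board)
--     opponent = 3 - color
--     corners = [(0, 0), (0, size-1), (size-1, 0), (size-1, size-1)]
--     adjacent_to_corners = set()
--
--     for cr, cc in corners:
--         for dr in [-1, 0, 1]:
--             for dc in [-1, 0, 1]:
--                 nr, nc = cr + dr, cc + dc
--                 if 0 <= nr < size and 0 <= nc < size and (nr, nc) not in corners:
--                     adjacent_to_corners.add((nr, nc))
--
--     def count_flips(row, col, color):
--         if board[row][col] != 0:
--             return 0
--
--         flips = 0
--         directions = [(-1,-1), (-1,0), (-1,1), (0,-1), (0,1), (1,-1), (1,0), (1,1)]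
--
--         for dr, dc in directions:
--             temp_flips = 0
--             r, c = row + dr, col + dc
--
--             while 0 <= r < size and 0 <= c < size and board[r][c] == opponent:
--                 temp_flips += 1
--                 r += dr
--                 c += dc
--
--             if 0 <= r < size and 0 <= c < size and board[r][c] == color and temp_flips > 0:
--                 flips += temp_flips
--
--         return flips
--
--     # single pass: no intermediate move lists, no sorting
--     first_corner = None      # first corner move in row-major order
--     best_nonadj = None       # earliest max-flip move not adjacent to a corner
--     best_overall = None      # earliest max-flip move
--     for r in range(size):
--         for c in range(size):
--             if board[r][c] != 0:
--                 continue
--             flips = count_flips(r, c, color)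
--             if flips <= 0:
--                 continue
--             if first_corner is None and (r, c) in corners:
--                 first_corner = (c, r)
--             if (r, c) not in adjacent_to_corners and (best_nonadj is None or flips > best_nonadj[2]):
--                 best_nonadj = (c, r, flips)
--             if best_overall is None or flips > best_overall[2]:
--                 best_overall = (c, r, flips)
--
--     if first_corner is not None:
--         return first_corner
--     if best_nonadj is not None:
--         return (best_nonadj[0], best_nonadj[1])
--     if best_overall is not None:
--         return (best_overall[0], best_overall[1])
--     return None
-- ===== Notes on version B (the rewrite author's own statement) =====
-- stated objective: simpler
-- what changed: Replaces the collect-all-moves-then-filter-and-sort selection with a single row-major pass that tracks the first corner move, the best non-corner-adjacent move and the best overall move (strict '>' preserves the stable-sort tie-break), so no intermediate lists and no sorting are built.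
import Mathlib
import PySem

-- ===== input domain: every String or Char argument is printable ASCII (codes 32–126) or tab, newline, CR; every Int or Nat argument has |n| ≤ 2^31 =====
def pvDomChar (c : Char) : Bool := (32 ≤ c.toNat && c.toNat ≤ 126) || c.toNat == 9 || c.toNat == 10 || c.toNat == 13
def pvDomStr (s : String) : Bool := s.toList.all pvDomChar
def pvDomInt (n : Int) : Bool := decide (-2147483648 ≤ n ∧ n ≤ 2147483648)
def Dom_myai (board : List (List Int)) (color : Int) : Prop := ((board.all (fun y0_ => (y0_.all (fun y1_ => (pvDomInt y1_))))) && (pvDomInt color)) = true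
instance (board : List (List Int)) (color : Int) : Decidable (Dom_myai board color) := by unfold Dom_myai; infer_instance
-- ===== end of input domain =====

-- B replaces A's collect-filter-and-sort move selection by one row-major pass keeping three
-- running registers (first corner move, best non-corner-adjacent move, best overall move);
-- objective: simpler (no intermediate move lists, no sorting). count_flips is Python-identical
-- in A and B, so the flip-counting helpers below are shared by both ports.

-- ===== SHARED HELPERS (identical Python code in A and B: board access, corners, the
--        corner-adjacency set, and count_flips) =====
-- board[r][c]; exact whenever 0 ≤ r < len(board) and 0 ≤ c < len(board[r]) — both ports read
-- a cell only after exactly Python's bounds checks, and Pre_ guarantees rows are long enough.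
def pvCell (board : List (List Int)) (r c : Int) : Int :=
  (board.getD r.toNat []).getD c.toNat 0

def pvCorners (size : Int) : List (Int × Int) :=
  [(0, 0), (0, size - 1), (size - 1, 0), (size - 1, size - 1)]

def pvAdj (size : Int) : PySem.Set (Int × Int) :=
  (pvCorners size).foldl (fun s cc =>
    [(-1 : Int), 0, 1].foldl (fun s dr =>
      [(-1 : Int), 0, 1].foldl (fun s dc =>
        let nr := cc.1 + dr
        let nc := cc.2 + dc
        if 0 ≤ nr ∧ nr < size ∧ 0 ≤ nc ∧ nc < size ∧ ¬ (pvCorners size).contains (nr, nc)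
        then PySem.Set.add s (nr, nc) else s) s) s) PySem.Set.empty

-- the inner while-loop of count_flips: walk from (r,c) in direction (dr,dc) while on-board
-- opponent stones; returns (temp_flips, final r, final c).  Fuel size+1 always suffices: the
-- walked coordinate is strictly monotone, so at most `size` in-bounds steps occur.
def pvWalk (board : List (List Int)) (size opp dr dc : Int) : Nat → Int → Int → Int × Int × Int
  | 0, r, c => (0, r, c)
  | n + 1, r, c =>
    if 0 ≤ r ∧ r < size ∧ 0 ≤ c ∧ c < size ∧ pvCell board r c = opp then
      let t := pvWalk board size opp dr dc n (r + dr) (c + dc)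
      (t.1 + 1, t.2)
    else (0, r, c)

def pvCountFlips (board : List (List Int)) (color row col : Int) : Int :=
  let size : Int := board.length
  let opp := 3 - color
  if pvCell board row col ≠ 0 then 0
  else
    [((-1 : Int), (-1 : Int)), (-1, 0), (-1, 1), (0, -1), (0, 1), (1, -1), (1, 0), (1, 1)].foldl
      (fun flips d =>
        let w := pvWalk board size opp d.1 d.2 (size.toNat + 1) (row + d.1) (col + d.2)
        if 0 ≤ w.2.1 ∧ w.2.1 < size ∧ 0 ≤ w.2.2 ∧ w.2.2 < size ∧
            pvCell board w.2.1 w.2.2 = color ∧ w.1 > 0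
        then flips + w.1 else flips) 0

-- ===== PORT A =====
def myai (board : List (List Int)) (color : Int) : Option (Int × Int) :=
  let size : Int := board.length
  let corners := pvCorners size
  let adj := pvAdj size
  let valid : List (Int × Int × Int) :=
    (PySem.List.pyRange 0 size).foldl (fun acc r =>
      (PySem.List.pyRange 0 size).foldl (fun acc c =>
        if pvCell board r c = 0 then
          let flips := pvCountFlips board color r c
          if flips > 0 then acc ++ [(c, r, flips)] else acc
        else acc) acc) []
  if valid = [] then none
  else
    match valid.filter (fun m => corners.contains (m.2.1, m.1)) with
    | m :: _ => some (m.1, m.2.1)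
    | [] =>
      match PySem.List.sorted (valid.filter (fun m => !(PySem.Set.contains adj (m.2.1, m.1))))
          (fun m => m.2.2) true with
      | m :: _ => some (m.1, m.2.1)
      | [] =>
        match PySem.List.sorted valid (fun m => m.2.2) true with
        | m :: _ => some (m.1, m.2.1)
        | [] => none   -- unreachable totalisation branch (valid ≠ [])

-- ===== PORT B =====
def myai_alt (board : List (List Int)) (color : Int) : Option (Int × Int) :=
  let size : Int := board.length
  let corners := pvCorners size
  let adj := pvAdj size
  let st :=
    (PySem.List.pyRange 0 size).foldl (fun st r =>
      (PySem.List.pyRange 0 size).foldl (fun st c =>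
        if pvCell board r c ≠ 0 then st
        else
          let flips := pvCountFlips board color r c
          if flips ≤ 0 then st
          else
            ((if st.1 = none ∧ corners.contains (r, c) then some (c, r) else st.1),
             (if PySem.Set.contains adj (r, c) then st.2.1
              else
                (match st.2.1 with
                 | none => some (c, r, flips)
                 | some b => if flips > b.2.2 then some (c, r, flips) else some b)),
             (match st.2.2 with
              | none => some (c, r, flips)
              | some b => if flips > b.2.2 then some (c, r, flips) else some b))) st)
      ((none : Option (Int × Int)), (none : Option (Int × Int × Int)),
       (none : Option (Int × Int × Int)))
  match st.1 with
  | some v => some v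
  | none =>
    match st.2.1 with
    | some b => some (b.1, b.2.1)
    | none =>
      match st.2.2 with
      | some b => some (b.1, b.2.1)
      | none => none

-- ===== PRECONDITION & SPEC =====
-- Pre_ excludes exactly the ragged boards (some of the first len(board) rows shorter than
-- len(board)) on which the Python A raises IndexError reading board[r][c].
def Pre_myai (board : List (List Int)) (color : Int) : Prop :=
  ∀ row ∈ board, board.length ≤ row.length
instance (board : List (List Int)) (color : Int) : Decidable (Pre_myai board color) := by
  unfold Pre_myai; infer_instance

def pvWitness_myai : List (List Int) × Int := ([[0, 1], [2, 0]], 1)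

def Spec_myai (board : List (List Int)) (color : Int) (out : Option (Int × Int)) : Prop :=
  out = myai_alt board color
instance (board : List (List Int)) (color : Int) (out : Option (Int × Int)) :
    Decidable (Spec_myai board color out) := by unfold Spec_myai; infer_instance

-- ===== CLAIM (what is proved, stated in full; the proofs are below) =====
def Claim_equal_myai : Prop := ∀ (board : List (List Int)) (color : Int),
  Dom_myai board color → Pre_myai board color → Spec_myai board color (myai board color)

-- ===== LEMMAS AND PROOFS =====

-- the per-cell "is this a valid move" extractor shared by both reductions
def pvGMove (board : List (List Int)) (color : Int) (p : Int × Int) : Option (Int × Int × Int) :=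
  if pvCell board p.1 p.2 = 0 then
    if pvCountFlips board color p.1 p.2 > 0 then some (p.2, p.1, pvCountFlips board color p.1 p.2)
    else none
  else none

-- collapsing the doubly nested loops to a single fold over the row-major cell list
theorem pv_nested_foldl {σ : Type} (rs cs : List Int) (h : σ → Int → Int → σ) :
    ∀ s : σ, rs.foldl (fun s r => cs.foldl (fun s c => h s r c) s) s
      = (rs.flatMap (fun r => cs.map (fun c => (r, c)))).foldl (fun s p => h s p.1 p.2) s := by
  induction rs with
  | nil => intro s; rfl
  | cons r rs ih =>
    intro s
    simp only [List.foldl_cons, List.flatMap_cons, List.foldl_append, List.foldl_map, ih]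

-- the append-collect loop is a filterMap
theorem pv_collect {α β : Type} (g : α → Option β) :
    ∀ (xs : List α) (acc : List β),
      xs.foldl (fun a x => (g x).elim a (fun m => a ++ [m])) acc
        = acc ++ xs.filterMap g := by
  intro xs
  induction xs with
  | nil => intro acc; simp
  | cons x xs ih =>
    intro acc
    cases hg : g x <;> simp [List.filterMap_cons, hg, ih]

-- a fold that skips the items g rejects is a fold over filterMap g
theorem pv_fold_opt {α β σ : Type} (g : α → Option β) (step : σ → β → σ) :
    ∀ (xs : List α) (s : σ),
      xs.foldl (fun s x => (g x).elim s (fun m => step s m)) s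
        = (xs.filterMap g).foldl step s := by
  intro xs
  induction xs with
  | nil => intro s; rfl
  | cons x xs ih =>
    intro s
    cases hg : g x <;> simp [List.filterMap_cons, hg, ih]

-- a componentwise fold of a triple state splits into three folds
theorem pv_foldl_triple {α σ1 σ2 σ3 : Type} (f1 : σ1 → α → σ1) (f2 : σ2 → α → σ2)
    (f3 : σ3 → α → σ3) :
    ∀ (xs : List α) (a : σ1) (b : σ2) (c : σ3),
      xs.foldl (fun s x => (f1 s.1 x, f2 s.2.1 x, f3 s.2.2 x)) (a, b, c)
        = (xs.foldl f1 a, xs.foldl f2 b, xs.foldl f3 c) := by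
  intro xs
  induction xs with
  | nil => intros; rfl
  | cons x xs ih => intro a b c; simp [ih]

-- a skip-on-p fold is a fold over the filter of ¬p
theorem pv_foldl_skip_filter {α σ : Type} (p : α → Bool) (step : σ → α → σ) :
    ∀ (xs : List α) (s : σ),
      xs.foldl (fun s m => if p m then s else step s m) s
        = (xs.filter (fun m => !p m)).foldl step s := by
  intro xs
  induction xs with
  | nil => intro s; rfl
  | cons x xs ih =>
    intro s
    cases hp : p x <;> simp [List.filter_cons, hp, ih]

-- the "set once" register: its final value is the first element passing p
theorem pv_first_some {α β : Type} (p : α → Bool) (f : α → β) :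
    ∀ (xs : List α) (v : β),
      xs.foldl (fun (o : Option β) m => if o = none ∧ p m then some (f m) else o) (some v)
        = some v := by
  intro xs
  induction xs with
  | nil => intro v; rfl
  | cons x xs ih => intro v; simp [ih]

theorem pv_first_none {α β : Type} (p : α → Bool) (f : α → β) :
    ∀ (xs : List α),
      xs.foldl (fun (o : Option β) m => if o = none ∧ p m then some (f m) else o) none
        = ((xs.filter p).head?).map f := by
  intro xs
  induction xs with
  | nil => rfl
  | cons x xs ih =>
    cases hp : p x <;> simp [List.filter_cons, hp, ih, pv_first_some]

-- head of the insertion-sort fold = the running strict-improvement argmax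
theorem pv_head_foldl_insertBy {α : Type} (bef : α → α → Bool) :
    ∀ (xs : List α) (acc : List α),
      (xs.foldl (fun a x => PySem.List.insertBy bef x a) acc).head?
        = xs.foldl (fun (o : Option α) x =>
            o.elim (some x) (fun b => if bef x b then some x else some b)) acc.head? := by
  intro xs
  induction xs with
  | nil => intro acc; rfl
  | cons x xs ih =>
    intro acc
    rw [List.foldl_cons, ih, List.foldl_cons]
    cases acc with
    | nil => rfl
    | cons y ys =>
      simp only [PySem.List.insertBy, List.head?_cons, Option.elim]
      cases hb : bef x y <;> simp [hb]

-- Python's reverse stable sort: its head is the first maximum under strict improvement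
theorem pv_head_sorted_rev {α : Type} (key : α → Int) (xs : List α) :
    (PySem.List.sorted xs key true).head?
      = xs.foldl (fun (o : Option α) x =>
          o.elim (some x) (fun b => if key b < key x then some x else some b)) none := by
  rw [PySem.List.sorted_rev_eq_foldl_insertBy, pv_head_foldl_insertBy]
  simp

theorem pv_main (board : List (List Int)) (color : Int) :
    myai board color = myai_alt board color := by
  unfold myai myai_alt
  simp only []
  set size : Int := (board.length : Int) with hsize
  set corners := pvCorners size with hcorners
  set adj := pvAdj size with hadj
  set g := pvGMove board color with hg
  set cells := (PySem.List.pyRange 0 size).flatMap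
      (fun r => (PySem.List.pyRange 0 size).map (fun c => (r, c))) with hcells
  set valid := cells.filterMap g with hvalid
  -- A's valid-move list is the filterMap of the extractor over the row-major cells
  have hvalidA :
      (PySem.List.pyRange 0 size).foldl (fun acc r =>
        (PySem.List.pyRange 0 size).foldl (fun acc c =>
          if pvCell board r c = 0 then
            if pvCountFlips board color r c > 0 then
              acc ++ [(c, r, pvCountFlips board color r c)]
            else acc
          else acc) acc) ([] : List (Int × Int × Int))
      = valid := by
    rw [pv_nested_foldl]
    have hb : (fun (a : List (Int × Int × Int)) (p : Int × Int) =>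
        if pvCell board p.1 p.2 = 0 then
          if pvCountFlips board color p.1 p.2 > 0 then
            a ++ [(p.2, p.1, pvCountFlips board color p.1 p.2)]
          else a
        else a)
      = (fun a p => (g p).elim a (fun m => a ++ [m])) := by
      funext a p
      simp only [hg, pvGMove]
      split_ifs <;> simp
    rw [hb, pv_collect]
    simp [hvalid, hcells]
  -- B's scan state, component by component
  have hscanB :
      (PySem.List.pyRange 0 size).foldl
        (fun (st : Option (Int × Int) × Option (Int × Int × Int) × Option (Int × Int × Int)) r =>
        (PySem.List.pyRange 0 size).foldl (fun st c =>
          if pvCell board r c ≠ 0 then st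
          else
            if pvCountFlips board color r c ≤ 0 then st
            else
              ((if st.1 = none ∧ corners.contains (r, c) then some (c, r) else st.1),
               (if PySem.Set.contains adj (r, c) then st.2.1
                else
                  (match st.2.1 with
                   | none => some (c, r, pvCountFlips board color r c)
                   | some b => if pvCountFlips board color r c > b.2.2 then
                       some (c, r, pvCountFlips board color r c) else some b)),
               (match st.2.2 with
                | none => some (c, r, pvCountFlips board color r c)
                | some b => if pvCountFlips board color r c > b.2.2 then
                    some (c, r, pvCountFlips board color r c) else some b))) st)
        ((none : Option (Int × Int)), (none : Option (Int × Int × Int)),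
         (none : Option (Int × Int × Int)))
      = ((valid.filter (fun m => corners.contains (m.2.1, m.1))).head?.map
            (fun m => (m.1, m.2.1)),
         (PySem.List.sorted (valid.filter (fun m => !(PySem.Set.contains adj (m.2.1, m.1))))
            (fun m => m.2.2) true).head?,
         (PySem.List.sorted valid (fun m => m.2.2) true).head?) := by
    rw [pv_nested_foldl]
    have hb : (fun (st : Option (Int × Int) × Option (Int × Int × Int) × Option (Int × Int × Int))
        (p : Int × Int) =>
        if pvCell board p.1 p.2 ≠ 0 then st
        else
          if pvCountFlips board color p.1 p.2 ≤ 0 then st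
          else
            ((if st.1 = none ∧ corners.contains (p.1, p.2) then some (p.2, p.1) else st.1),
             (if PySem.Set.contains adj (p.1, p.2) then st.2.1
              else
                (match st.2.1 with
                 | none => some (p.2, p.1, pvCountFlips board color p.1 p.2)
                 | some b => if pvCountFlips board color p.1 p.2 > b.2.2 then
                     some (p.2, p.1, pvCountFlips board color p.1 p.2) else some b)),
             (match st.2.2 with
              | none => some (p.2, p.1, pvCountFlips board color p.1 p.2)
              | some b => if pvCountFlips board color p.1 p.2 > b.2.2 then
                  some (p.2, p.1, pvCountFlips board color p.1 p.2) else some b)))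
      = (fun (st : Option (Int × Int) × Option (Int × Int × Int) × Option (Int × Int × Int))
          (p : Int × Int) => (g p).elim st (fun (m : Int × Int × Int) =>
          ((fun (o : Option (Int × Int)) m =>
              if o = none ∧ corners.contains (m.2.1, m.1) then some (m.1, m.2.1) else o) st.1 m,
           (fun (o : Option (Int × Int × Int)) m =>
              if PySem.Set.contains adj (m.2.1, m.1) then o
              else o.elim (some m) (fun b => if b.2.2 < m.2.2 then some m else some b)) st.2.1 m,
           (fun (o : Option (Int × Int × Int)) m =>
              o.elim (some m) (fun b => if b.2.2 < m.2.2 then some m else some b)) st.2.2 m))) := by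
      funext st p
      simp only [hg, pvGMove]
      by_cases h0 : pvCell board p.1 p.2 = 0
      · by_cases hf : pvCountFlips board color p.1 p.2 > 0
        · have hf' : ¬ pvCountFlips board color p.1 p.2 ≤ 0 := by omega
          simp only [h0, hf, hf', if_true, if_false, not_true, ite_false, Option.elim]
          simp [h0, hf']
          cases st.2.1 <;> cases st.2.2 <;> simp [gt_iff_lt]
        · have hf' : pvCountFlips board color p.1 p.2 ≤ 0 := by omega
          simp [h0, hf, hf']
      · simp [h0]
    rw [hb, pv_fold_opt,
        pv_foldl_triple
          (fun (o : Option (Int × Int)) (m : Int × Int × Int) =>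
            if o = none ∧ corners.contains (m.2.1, m.1) then some (m.1, m.2.1) else o)
          (fun (o : Option (Int × Int × Int)) (m : Int × Int × Int) =>
            if PySem.Set.contains adj (m.2.1, m.1) then o
            else o.elim (some m) (fun b => if b.2.2 < m.2.2 then some m else some b))
          (fun (o : Option (Int × Int × Int)) (m : Int × Int × Int) =>
            o.elim (some m) (fun b => if b.2.2 < m.2.2 then some m else some b)),
        pv_first_none, pv_foldl_skip_filter,
        ← pv_head_sorted_rev, ← pv_head_sorted_rev, ← hvalid]
  rw [hvalidA, hscanB]
  -- final selection: case analysis on the three registers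
  by_cases hv : valid = []
  · simp [hv, PySem.List.sorted]
  · simp only [if_neg hv]
    cases hc : (valid.filter (fun m => corners.contains (m.2.1, m.1))).head? with
    | some m =>
      obtain ⟨t, ht⟩ : ∃ t, valid.filter (fun m => corners.contains (m.2.1, m.1)) = m :: t := by
        cases hl : valid.filter (fun m => corners.contains (m.2.1, m.1)) with
        | nil => rw [hl] at hc; simp at hc
        | cons a t => rw [hl] at hc; simp at hc; exact ⟨t, by rw [hc]⟩
      rw [ht]
      simp
    | none =>
      have ht : valid.filter (fun m => corners.contains (m.2.1, m.1)) = [] := by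
        cases hl : valid.filter (fun m => corners.contains (m.2.1, m.1)) with
        | nil => rfl
        | cons a t => rw [hl] at hc; simp at hc
      rw [ht]
      simp only [List.head?_nil, Option.map_none]
      cases hn : (PySem.List.sorted (valid.filter (fun m => !(PySem.Set.contains adj (m.2.1, m.1))))
          (fun m => m.2.2) true) with
      | cons m t => simp [hn]
      | nil =>
        simp only [hn, List.head?_nil]
        cases ho : (PySem.List.sorted valid (fun m => m.2.2) true) with
        | cons m t => simp [ho]
        | nil => simp [ho]

-- ===== VERDICT (by name: the statement is the Claim_ definition above) =====
theorem myai_spec : Claim_equal_myai := by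
  intro board color _ _
  unfold Spec_myai
  exact pv_main board color
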